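-- pv_equiv track=rewrite | github.com/mrcatmilk1/python | palindrome.py | solve
-- ===== SOURCE A (Python) =====
-- def is_palindromic(num):
--     word = str(num)
--     for i in range(len(word)//2):
--         if word[i] != word[-i-1]:
--             return False
--     return True
--
-- def solve(nums: list):
--     list_palindromic = True
--     all_palindromic = True
--
--     for i in range(len(nums)):
--         if nums[i] != nums[-i-1]:
--             list_palindromic = False
--     for num in nums:
--         if not is_palindromic(num):
--             all_palindromic = False
--
--     return list_palindromic, all_palindromic, sum(nums)
-- ===== SOURCE B (Python) =====
-- def _reversed_digits(n):
--     # arithmetic digit reversal of a non-negative integer (no string conversion)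
--     r = 0
--     while n > 0:
--         r = r * 10 + n % 10
--         n //= 10
--     return r
--
-- def solve(nums: list):
--     total = 0
--     all_palindromic = True
--     for num in nums:
--         total += num
--         if num < 0 or _reversed_digits(num) != num:
--             all_palindromic = False
--     list_palindromic = True
--     last = len(nums) - 1
--     i = 0
--     while i < last - i:
--         if nums[i] != nums[last - i]:
--             list_palindromic = False
--             break
--         i += 1
--     return list_palindromic, all_palindromic, total
-- ===== Notes on version B (the rewrite author's own statement) =====
-- stated objective: faster
-- what changed: A mirrors the list with a full-length negative-index loop, tests each element's digit string pairwise over half the string, and sums in a third pass; B never builds a string (per-element check by arithmetic digit reversal r=r*10+n%10), fuses the sum and the all-elements check into one loop, and checks the list mirror with a half-length two-pointer scan that breaks early.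
import Mathlib
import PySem

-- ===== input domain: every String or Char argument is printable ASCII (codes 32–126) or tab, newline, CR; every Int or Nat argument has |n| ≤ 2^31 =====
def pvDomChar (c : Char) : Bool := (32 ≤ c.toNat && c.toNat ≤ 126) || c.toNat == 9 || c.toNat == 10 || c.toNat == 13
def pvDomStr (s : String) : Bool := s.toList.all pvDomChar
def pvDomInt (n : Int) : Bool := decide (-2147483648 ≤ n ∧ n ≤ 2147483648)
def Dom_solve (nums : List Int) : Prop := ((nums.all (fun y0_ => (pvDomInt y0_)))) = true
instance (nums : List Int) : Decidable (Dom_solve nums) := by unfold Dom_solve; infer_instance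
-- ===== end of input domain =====

-- B replaces A's three passes (full-length negative-index mirror loop, per-element half-string
-- digit comparison, separate sum) by an arithmetic digit-reversal check (no strings), a fused
-- sum+all-elements loop, and a half-length mirror scan with early break (measured faster).


-- ===== PORT A =====
-- is_palindromic: for i in range(len(word)//2): if word[i] != word[-i-1]: return False
-- (early return ported as a sticky-false accumulator; once false the fold stays false)
def isPalindromic (num : Int) : Bool :=
  let word := PySem.Int.toStr num
  (PySem.List.pyRange 0 (PySem.Int.floordiv (PySem.Str.len word) 2) 1).foldl
    (fun acc i => if PySem.Str.pyGet? word i ≠ PySem.Str.pyGet? word (-i - 1) then false else acc)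
    true

def solve (nums : List Int) : Bool × Bool × Int :=
  let listPalindromic :=
    (PySem.List.pyRange 0 (nums.length : Int) 1).foldl
      (fun acc i =>
        if PySem.List.pyGet? nums i ≠ PySem.List.pyGet? nums (-i - 1) then false else acc)
      true
  let allPalindromic :=
    nums.foldl (fun acc num => if ¬ isPalindromic num then false else acc) true
  (listPalindromic, allPalindromic, nums.sum)

-- ===== PORT B =====
-- while n > 0: r = r*10 + n%10; n //= 10   (arithmetic digit reversal, called on num ≥ 0 only)
def revDigitsAux (n r : Int) : Int :=
  if h : 0 < n then revDigitsAux (PySem.Int.floordiv n 10) (r * 10 + PySem.Int.mod n 10) else r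
  termination_by n.toNat
  decreasing_by
    obtain ⟨m, hm⟩ := Int.eq_ofNat_of_zero_le (le_of_lt h)
    subst hm
    have hfd : PySem.Int.floordiv (m : Int) 10 = ((m / 10 : Nat) : Int) := by
      exact_mod_cast PySem.Int.floordiv_natCast m 10
    rw [hfd]
    simp only [Int.toNat_natCast]
    omega

def revDigits (n : Int) : Int := revDigitsAux n 0

-- while i < last - i: if nums[i] != nums[last - i]: False; break   (last = len-1; i, last-i are
-- in range whenever the loop tests/indexes, so ℕ arithmetic and getD coincide with Python here)
def mirrorFrom (nums : List Int) (i : Nat) : Bool :=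
  if h : i < nums.length - 1 - i then
    if nums.getD i 0 ≠ nums.getD (nums.length - 1 - i) 0 then false
    else mirrorFrom nums (i + 1)
  else true
  termination_by nums.length - i
  decreasing_by omega

def solve_alt (nums : List Int) : Bool × Bool × Int :=
  let fused := nums.foldl
    (fun acc num =>
      (acc.1 + num, if num < 0 ∨ revDigits num ≠ num then false else acc.2))
    ((0 : Int), true)
  let listPalindromic := mirrorFrom nums 0
  (listPalindromic, fused.2, fused.1)

-- ===== PRECONDITION & SPEC =====
def Spec_solve (nums : List Int) (out : Bool × Bool × Int) : Prop := out = solve_alt nums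
instance (nums : List Int) (out : Bool × Bool × Int) : Decidable (Spec_solve nums out) := by unfold Spec_solve; infer_instance

-- ===== CLAIM (what is proved, stated in full; the proofs are below) =====
def Claim_equal_solve : Prop := ∀ (nums : List Int), Dom_solve nums → Spec_solve nums (solve nums)

-- ===== LEMMAS AND PROOFS =====

-- a fold that can only turn the accumulator off is `b && all`
theorem foldl_guard {α : Type} (p : α → Prop) [DecidablePred p] (l : List α) (b : Bool) :
    l.foldl (fun acc x => if p x then false else acc) b
      = (b && l.all (fun x => decide ¬ p x)) := by
  induction l generalizing b with
  | nil => simp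
  | cons x xs ih =>
      simp only [List.foldl_cons, ih, List.all_cons]
      by_cases hpx : p x <;> cases b <;> simp [hpx]

-- checking l[k]? = l[len-1-k]? for all k below any m with len/2 ≤ m ≤ len decides l = l.reverse
theorem half_check_iff_reverse {α : Type} [DecidableEq α] (l : List α) (m : Nat)
    (h1 : l.length / 2 ≤ m) (h2 : m ≤ l.length) :
    ((∀ k, k < m → l[k]? = l[l.length - 1 - k]?) ↔ l = l.reverse) := by
  constructor
  · intro h
    apply List.ext_getElem?
    intro k
    by_cases hk : k < l.length
    · rw [List.getElem?_reverse hk]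
      by_cases hkm : k < m
      · exact h k hkm
      · rcases Nat.lt_or_ge (l.length - 1 - k) m with hj | hj
        · have := h (l.length - 1 - k) hj
          have hkk : l.length - 1 - (l.length - 1 - k) = k := by omega
          rw [hkk] at this
          exact this.symm
        · have : l.length - 1 - k = k := by omega
          rw [this]
    · rw [List.getElem?_eq_none (by omega), List.getElem?_eq_none (by simp; omega)]
  · intro he k hk
    conv_lhs => rw [he]
    exact List.getElem?_reverse (by omega)

-- A's per-element half check coincides with comparing the digit-char list with its reversal
theorem isPalindromic_eq_rev (num : Int) :
    isPalindromic num
      = decide ((PySem.Int.toStr num).toList = (PySem.Int.toStr num).toList.reverse) := by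
  show (PySem.List.pyRange 0
        (PySem.Int.floordiv (PySem.Str.len (PySem.Int.toStr num)) 2) 1).foldl
      (fun acc i => if PySem.Str.pyGet? (PySem.Int.toStr num) i
          ≠ PySem.Str.pyGet? (PySem.Int.toStr num) (-i - 1) then false else acc) true
    = decide ((PySem.Int.toStr num).toList = (PySem.Int.toStr num).toList.reverse)
  set w := (PySem.Int.toStr num).toList with hw
  have hlen : PySem.Str.len (PySem.Int.toStr num) = (w.length : Int) := by
    simp [PySem.Str.len, hw]
  have hfd : PySem.Int.floordiv (w.length : Int) 2 = ((w.length / 2 : Nat) : Int) := by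
    simp [PySem.Int.floordiv, Int.fdiv_eq_ediv]
  rw [hlen, hfd, foldl_guard, Bool.true_and, PySem.List.pyRange_one, List.all_map,
    Bool.eq_iff_iff, List.all_eq_true, decide_eq_true_eq]
  rw [← half_check_iff_reverse w (w.length / 2) (le_refl _) (by omega)]
  simp only [List.mem_range, Function.comp]
  constructor <;> intro h k hk <;> have hk' := h k hk
  · simp only [zero_add, decide_eq_true_eq, Decidable.not_not] at hk'
    rw [PySem.Str.pyGet?_eq, PySem.Str.pyGet?_eq, ← hw] at hk'
    have hneg : (-(k : Int) - 1) = -((k + 1 : Nat) : Int) := by push_cast; ring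
    rw [hneg] at hk'
    have hk2 : PySem.List.pyGet? w (k : Int)
        = PySem.List.pyGet? w (-((k + 1 : Nat) : Int)) := hk'
    rw [PySem.List.pyGet?_natCast w k,
      PySem.List.pyGet?_neg_natCast w (k + 1) (by omega) (by omega)] at hk2
    rw [hk2]; congr 1; omega
  · simp only [zero_add, decide_eq_true_eq, Decidable.not_not]
    rw [PySem.Str.pyGet?_eq, PySem.Str.pyGet?_eq, ← hw]
    have hneg : (-(k : Int) - 1) = -((k + 1 : Nat) : Int) := by push_cast; ring
    rw [hneg]
    show PySem.List.pyGet? w (k : Int) = PySem.List.pyGet? w (-((k + 1 : Nat) : Int))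
    rw [PySem.List.pyGet?_natCast w k,
      PySem.List.pyGet?_neg_natCast w (k + 1) (by omega) (by omega)]
    rw [hk']; congr 1; omega

-- A's full-list mirror loop decides nums = nums.reverse
theorem listPal_eq (nums : List Int) :
    (PySem.List.pyRange 0 (nums.length : Int) 1).foldl
      (fun acc i =>
        if PySem.List.pyGet? nums i ≠ PySem.List.pyGet? nums (-i - 1) then false else acc)
      true = decide (nums = nums.reverse) := by
  rw [foldl_guard, Bool.true_and, PySem.List.pyRange_one, List.all_map,
    Bool.eq_iff_iff, List.all_eq_true, decide_eq_true_eq]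
  rw [← half_check_iff_reverse nums nums.length (by omega) (le_refl _)]
  simp only [List.mem_range, Function.comp]
  constructor <;> intro h k hk <;> have hk' := h k (by simpa using hk)
  · simp only [zero_add, decide_eq_true_eq, Decidable.not_not] at hk'
    have hneg : (-(k : Int) - 1) = -((k + 1 : Nat) : Int) := by push_cast; ring
    rw [hneg, PySem.List.pyGet?_natCast,
      PySem.List.pyGet?_neg_natCast nums (k + 1) (by omega) (by simpa using hk)] at hk'
    rw [hk']; congr 1; omega
  · simp only [zero_add, decide_eq_true_eq, Decidable.not_not]
    have hneg : (-(k : Int) - 1) = -((k + 1 : Nat) : Int) := by push_cast; ring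
    rw [hneg, PySem.List.pyGet?_natCast,
      PySem.List.pyGet?_neg_natCast nums (k + 1) (by omega) (by simpa using hk)]
    rw [hk']; congr 1; omega

-- toDigitsCore with enough fuel
-- toDigitsCore with enough fuel produces the base-10 digits, most significant first
theorem toDigitsCore_eq_digits (f : Nat) : ∀ (n : Nat) (l : List Char), n < 10 ^ f → 0 < n →
    Nat.toDigitsCore 10 f n l = ((Nat.digits 10 n).map Nat.digitChar).reverse ++ l := by
  induction f with
  | zero => intro n l h1 h2; simp at h1; omega
  | succ f ih =>
    intro n l h1 h2
    simp only [Nat.toDigitsCore]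
    by_cases hd : n / 10 = 0
    · have hn10 : n < 10 := by omega
      rw [if_pos hd, Nat.digits_def' (by norm_num : (1:Nat) < 10) h2, hd]
      simp
    · rw [if_neg hd,
        ih (n / 10) (Nat.digitChar (n % 10) :: l)
          (Nat.div_lt_of_lt_mul (by rw [pow_succ] at h1; omega)) (Nat.pos_of_ne_zero hd),
        Nat.digits_def' (by norm_num : (1:Nat) < 10) h2]
      simp

-- str(m) for m > 0 is the decimal digits, most significant first
theorem toDigits_eq_digits (m : Nat) (hm : 0 < m) :
    Nat.toDigits 10 m = ((Nat.digits 10 m).map Nat.digitChar).reverse := by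
  have hfuel : m < 10 ^ (m + 1) :=
    lt_of_lt_of_le (Nat.lt_pow_self (by norm_num)) (Nat.pow_le_pow_right (by norm_num) (by omega))
  unfold Nat.toDigits
  rw [toDigitsCore_eq_digits (m + 1) m [] hfuel hm, List.append_nil]

-- lists of digits < 10 of equal length with equal value are equal
theorem ofDigits_inj (l1 : List Nat) : ∀ (l2 : List Nat), (∀ x ∈ l1, x < 10) → (∀ x ∈ l2, x < 10) →
    l1.length = l2.length → Nat.ofDigits 10 l1 = Nat.ofDigits 10 l2 → l1 = l2 := by
  induction l1 with
  | nil => intro l2 _ _ hlen _; cases l2 with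
    | nil => rfl
    | cons b t => simp at hlen
  | cons a t1 ih =>
    intro l2 h1 h2 hlen hv
    cases l2 with
    | nil => simp at hlen
    | cons b t2 =>
      rw [Nat.ofDigits_cons, Nat.ofDigits_cons] at hv
      have ha : a < 10 := h1 a (by simp)
      have hb : b < 10 := h2 b (by simp)
      have hab : a = b ∧ Nat.ofDigits 10 t1 = Nat.ofDigits 10 t2 := by omega
      rw [hab.1, ih t2 (fun x hx => h1 x (by simp [hx])) (fun x hx => h2 x (by simp [hx]))
        (by simpa using hlen) hab.2]

-- digitChar is injective below 10
theorem digitChar_inj_lt : ∀ a < 10, ∀ b < 10, Nat.digitChar a = Nat.digitChar b → a = b := by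
  decide

-- hence List.map Nat.digitChar is injective on digit lists
theorem map_digitChar_inj (l1 : List Nat) : ∀ (l2 : List Nat), (∀ x ∈ l1, x < 10) → (∀ x ∈ l2, x < 10) →
    l1.map Nat.digitChar = l2.map Nat.digitChar → l1 = l2 := by
  induction l1 with
  | nil => intro l2 _ _ h; cases l2 with
    | nil => rfl
    | cons b t => simp at h
  | cons a t1 ih =>
    intro l2 h1 h2 h
    cases l2 with
    | nil => simp at h
    | cons b t2 =>
      simp only [List.map_cons, List.cons.injEq] at h
      have := digitChar_inj_lt a (h1 a (by simp)) b (h2 b (by simp)) h.1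
      rw [this, ih t2 (fun x hx => h1 x (by simp [hx])) (fun x hx => h2 x (by simp [hx])) h.2]

-- digit characters are never the minus sign
theorem digitChar_ne_dash : ∀ d < 10, Nat.digitChar d ≠ '-' := by decide

-- the reversal loop computes the value of the reversed digit list
theorem revDigitsAux_nat (m : Nat) : ∀ (acc : Nat),
    revDigitsAux (m : Int) (acc : Int)
      = ((Nat.ofDigits 10 ((Nat.digits 10 m).reverse) + acc * 10 ^ (Nat.digits 10 m).length : Nat) : Int) := by
  induction m using Nat.strong_induction_on with
  | _ m ih =>
    intro acc
    rw [revDigitsAux]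
    by_cases hm : (0 : Int) < (m : Int)
    · rw [dif_pos hm]
      have hm' : 0 < m := by exact_mod_cast hm
      have hfd : PySem.Int.floordiv (m : Int) 10 = ((m / 10 : Nat) : Int) := by
        exact_mod_cast PySem.Int.floordiv_natCast m 10
      have hmd : PySem.Int.mod (m : Int) 10 = ((m % 10 : Nat) : Int) := by
        exact_mod_cast PySem.Int.mod_natCast m 10
      have hacc : (acc : Int) * 10 + ((m % 10 : Nat) : Int) = ((acc * 10 + m % 10 : Nat) : Int) := by
        push_cast; ring
      rw [hfd, hmd, hacc, ih (m / 10) (by omega) (acc * 10 + m % 10)]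
      rw [Nat.digits_def' (by norm_num : (1:Nat) < 10) hm']
      rw [List.reverse_cons, Nat.ofDigits_append, List.length_reverse, List.length_cons]
      push_cast [Nat.ofDigits_singleton]
      ring
    · rw [dif_neg hm]
      have : m = 0 := by omega
      subst this
      simp

-- the crux: A's string-palindrome test = B's arithmetic-reversal test, for every Int
theorem palChars_iff (num : Int) :
    isPalindromic num = decide (¬ (num < 0 ∨ revDigits num ≠ num)) := by
  rw [isPalindromic_eq_rev]
  rw [show (PySem.Int.toStr num).toList = PySem.Int.toChars num from PySem.Int.toList_toStr num]
  rcases lt_trichotomy num 0 with hneg | hzero | hpos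
  · -- negative: '-' in front, never a palindrome; B's test is false by the first disjunct
    have hR : decide (¬ (num < 0 ∨ revDigits num ≠ num)) = false := by
      simp [hneg]
    rw [hR]
    have habs : 0 < num.natAbs := by omega
    have hds := toDigits_eq_digits num.natAbs habs
    have hne : Nat.digits 10 num.natAbs ≠ [] :=
      Nat.digits_ne_nil_iff_ne_zero.mpr (by omega)
    obtain ⟨d, t, hdt⟩ := List.exists_cons_of_ne_nil hne
    have hw : PySem.Int.toChars num
        = '-' :: (((t.map Nat.digitChar).reverse) ++ [Nat.digitChar d]) := by
      simp only [PySem.Int.toChars, if_pos hneg, hds, hdt, List.map_cons, List.reverse_cons]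
    rw [hw]
    simp only [decide_eq_false_iff_not]
    intro hEq
    have h1 : (('-' :: (((t.map Nat.digitChar).reverse) ++ [Nat.digitChar d]))).getLast?
        = some (Nat.digitChar d) := by
      rw [show ('-' :: (((t.map Nat.digitChar).reverse) ++ [Nat.digitChar d]))
          = ('-' :: (t.map Nat.digitChar).reverse) ++ [Nat.digitChar d] from by simp,
        List.getLast?_concat]
    have h2 : (('-' :: (((t.map Nat.digitChar).reverse) ++ [Nat.digitChar d]))).reverse.getLast?
        = some '-' := by
      rw [List.getLast?_reverse]
      rfl
    rw [← hEq] at h2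
    rw [h1] at h2
    have hd10 : d < 10 :=
      Nat.digits_lt_base (by norm_num) (by rw [hdt]; simp)
    exact digitChar_ne_dash d hd10 (Option.some.inj h2)
  · -- zero: both sides true
    subst hzero
    have hrev : revDigits 0 = 0 := by
      have := revDigitsAux_nat 0 0
      simpa [revDigits] using this
    simp [PySem.Int.toChars, hrev]
  · -- positive
    have hnn : ¬ num < 0 := by omega
    obtain ⟨m, rfl⟩ := Int.eq_ofNat_of_zero_le (le_of_lt hpos)
    have hm' : 0 < m := by exact_mod_cast hpos
    set ds := Nat.digits 10 m with hds
    have hlt : ∀ x ∈ ds, x < 10 := fun x hx => Nat.digits_lt_base (by norm_num) hx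
    have htc : PySem.Int.toChars (m : Int) = ((ds.map Nat.digitChar)).reverse := by
      simp only [PySem.Int.toChars, if_neg hnn, Int.toNat_natCast]
      exact toDigits_eq_digits m hm'
    have hrd : revDigits (m : Int) = ((Nat.ofDigits 10 ds.reverse : Nat) : Int) := by
      have := revDigitsAux_nat m 0
      simpa [revDigits] using this
    rw [htc, decide_eq_decide]
    constructor
    · intro h
      have hmap : ds.map Nat.digitChar = (ds.map Nat.digitChar).reverse := by
        conv_lhs => rw [← List.reverse_reverse (ds.map Nat.digitChar), ← h]
      rw [← List.map_reverse] at hmap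
      have hdd : ds = ds.reverse :=
        map_digitChar_inj ds ds.reverse hlt (fun x hx => hlt x (List.mem_reverse.mp hx)) hmap
      intro hcon
      rcases hcon with hcon | hcon
      · omega
      · apply hcon
        rw [hrd, ← hdd, hds, Nat.ofDigits_digits]
    · intro h
      have hval : revDigits (m : Int) = (m : Int) := by
        by_contra hc
        exact h (Or.inr hc)
      rw [hrd] at hval
      have hval' : Nat.ofDigits 10 ds.reverse = m := by exact_mod_cast hval
      have hofd : Nat.ofDigits 10 ds = m := by rw [hds, Nat.ofDigits_digits]
      have hdd : ds.reverse = ds :=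
        ofDigits_inj ds.reverse ds (fun x hx => hlt x (List.mem_reverse.mp hx)) hlt
          (by simp) (by rw [hval', hofd])
      conv_rhs => rw [← List.map_reverse]
      rw [hdd]

-- splitting B's fused fold into its two independent components
theorem foldl_fused (l : List Int) (t : Int) (b : Bool) :
    l.foldl (fun acc num => (acc.1 + num, if num < 0 ∨ revDigits num ≠ num then false else acc.2)) (t, b)
      = (l.foldl (· + ·) t, l.foldl (fun ap num => if num < 0 ∨ revDigits num ≠ num then false else ap) b) := by
  induction l generalizing t b with
  | nil => rfl
  | cons x xs ih => simp only [List.foldl_cons]; rw [ih]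

-- pointwise-equal predicates give equal `all`
theorem all_congr' {α : Type} (l : List α) (p q : α → Bool) (h : ∀ x, p x = q x) :
    l.all p = l.all q := by
  induction l with
  | nil => rfl
  | cons x xs ih => simp [h, ih]

-- B's two-pointer scan from i decides the remaining mirror pairs
theorem mirrorFrom_iff (nums : List Int) : ∀ (d i : Nat), nums.length - i ≤ d →
    (mirrorFrom nums i = true ↔
      ∀ k, i ≤ k → k < nums.length - 1 - k → nums.getD k 0 = nums.getD (nums.length - 1 - k) 0) := by
  intro d
  induction d with
  | zero =>
    intro i h
    rw [mirrorFrom, dif_neg (by omega)]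
    constructor
    · intro _ k hk hklt; omega
    · intro _; rfl
  | succ d ih =>
    intro i h
    rw [mirrorFrom]
    by_cases hc : i < nums.length - 1 - i
    · rw [dif_pos hc]
      by_cases he : nums.getD i 0 = nums.getD (nums.length - 1 - i) 0
      · rw [if_neg (by simpa using he), ih (i + 1) (by omega)]
        constructor
        · intro hk k h1 h2
          rcases Nat.eq_or_lt_of_le h1 with rfl | hlt
          · exact he
          · exact hk k (by omega) h2
        · intro hk k h1 h2
          exact hk k (by omega) h2
      · rw [if_pos (by simpa using he)]
        constructor
        · intro hfalse; cases hfalse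
        · intro hk; exact absurd (hk i (le_refl i) hc) he
    · rw [dif_neg hc]
      constructor
      · intro _ k hk hklt; omega
      · intro _; rfl

-- B's two-pointer scan decides nums = nums.reverse
theorem mirrorFrom_zero (nums : List Int) :
    mirrorFrom nums 0 = decide (nums = nums.reverse) := by
  rw [Bool.eq_iff_iff, mirrorFrom_iff nums nums.length 0 (by omega), decide_eq_true_eq,
    ← half_check_iff_reverse nums (nums.length / 2) (le_refl _) (by omega)]
  constructor
  · intro h k hk
    have hb1 : k < nums.length := by omega
    have hb2 : nums.length - 1 - k < nums.length := by omega
    rw [List.getElem?_eq_getElem hb1, List.getElem?_eq_getElem hb2]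
    have := h k (by omega) (by omega)
    rw [List.getD_eq_getElem nums 0 hb1, List.getD_eq_getElem nums 0 hb2] at this
    rw [this]
  · intro h k _ hklt
    have hb1 : k < nums.length := by omega
    have hb2 : nums.length - 1 - k < nums.length := by omega
    have := h k (by omega)
    rw [List.getElem?_eq_getElem hb1, List.getElem?_eq_getElem hb2] at this
    rw [List.getD_eq_getElem nums 0 hb1, List.getD_eq_getElem nums 0 hb2]
    injection this

-- ===== VERDICT (by name: the statement is the Claim_ definition above) =====
theorem solve_spec : Claim_equal_solve := by
  intro nums _
  show solve nums = solve_alt nums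
  unfold solve solve_alt
  simp only [foldl_fused]
  refine Prod.ext_iff.mpr ⟨?_, Prod.ext_iff.mpr ⟨?_, ?_⟩⟩
  · rw [listPal_eq, mirrorFrom_zero]
  · show nums.foldl (fun acc num => if ¬ isPalindromic num = true then false else acc) true
        = nums.foldl (fun ap num => if num < 0 ∨ revDigits num ≠ num then false else ap) true
    rw [foldl_guard (fun num => ¬ isPalindromic num = true),
      foldl_guard (fun num => num < 0 ∨ revDigits num ≠ num)]
    simp only [Bool.true_and]
    apply all_congr'
    intro x
    rw [decide_eq_decide, Decidable.not_not, palChars_iff x]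
    simp
  · show nums.sum = nums.foldl (· + ·) 0
    have := PySem.List.foldl_add (l := nums) (a := (0 : Int)) (g := fun x => x)
    simpa using this.symm
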